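-- pv_equiv track=rewrite | github.com/torisutansan02/Grokking-Series | Data Manipulation/questions/q1_user_time_ranges.py | get_user_time_ranges
-- ===== SOURCE A (Python) =====
-- from typing import List, Dict
--
-- def get_user_time_ranges(logs: List[Dict[str, str]]) -> Dict[str, str]:
--     # Set an empty hash map for user id's and their correlated timestamps
--     user_times = {}
--
--     for log in logs:
--         # Assign UID to userId and ts to timestamp
--         uid, ts = log["userId"], log["timestamp"]
--
--         # Add uid to hash map
--         if uid not in user_times:
--             user_times[uid] = [ts, ts]
--         # Min = Start, Max = End
--         else:
--             user_times[uid][0] = min(user_times[uid][0], ts)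
--             user_times[uid][1] = max(user_times[uid][1], ts)
--
--     # 'uid': 'start - end'
--     return {
--         uid: f"{start} - {end}"
--         for uid, (start, end) in user_times.items()
--     }
-- ===== SOURCE B (Python) =====
-- def get_user_time_ranges(logs):
--     # Group pass: uid -> list of all timestamps, in first-seen key order.
--     groups = {}
--     for log in logs:
--         groups.setdefault(log["userId"], []).append(log["timestamp"])
--     # Reduce pass: min/max over each group.
--     return {uid: f"{min(ts)} - {max(ts)}" for uid, ts in groups.items()}
-- ===== Notes on version B (the rewrite author's own statement) =====
-- stated objective: alternative
-- what changed: B replaces A's single-pass incremental min/max update (first-seen/else branch in the loop) with a group-then-reduce structure: one pass collecting every timestamp per user via setdefault/append, then a second pass taking min and max of each group.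
import Mathlib
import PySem

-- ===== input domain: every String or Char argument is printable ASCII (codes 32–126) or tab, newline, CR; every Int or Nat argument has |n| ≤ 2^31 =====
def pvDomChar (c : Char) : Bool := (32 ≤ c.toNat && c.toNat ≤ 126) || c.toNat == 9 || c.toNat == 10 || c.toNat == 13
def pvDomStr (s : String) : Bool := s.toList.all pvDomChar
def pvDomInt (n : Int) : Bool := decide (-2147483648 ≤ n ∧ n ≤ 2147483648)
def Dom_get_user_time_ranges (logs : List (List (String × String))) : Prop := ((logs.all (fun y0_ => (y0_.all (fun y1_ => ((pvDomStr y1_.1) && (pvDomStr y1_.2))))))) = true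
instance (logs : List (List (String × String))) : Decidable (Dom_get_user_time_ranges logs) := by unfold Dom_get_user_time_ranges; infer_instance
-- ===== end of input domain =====

-- B groups all timestamps per user in one pass (setdefault/append, no min/max branch in the
-- loop), then a second pass reduces each group with min/max; same return value as A.

-- ===== PORT A =====
-- A: single pass keeping a running [min, max] pair per user, then format.
def get_user_time_ranges (logs : List (List (String × String))) : List (String × String) :=
  let user_times := logs.foldl (fun d log =>
    let uid := (PySem.Dict.mk log).getD "userId" ""      -- log["userId"]  (Pre_ guarantees presence)
    let ts  := (PySem.Dict.mk log).getD "timestamp" ""   -- log["timestamp"]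
    if !(d.contains uid) then
      d.insert uid (ts, ts)
    else
      let cur := d.getD uid ("", "")
      d.insert uid (min cur.1 ts, max cur.2 ts))
    (PySem.Dict.empty : PySem.Dict String (String × String))
  user_times.items.map (fun p => (p.1, p.2.1 ++ " - " ++ p.2.2))

-- ===== PORT B =====
-- B: group pass (append every timestamp), then reduce pass with min/max over each group.
def get_user_time_ranges_alt (logs : List (List (String × String))) : List (String × String) :=
  let groups := logs.foldl (fun d log =>
    d.modify ((PySem.Dict.mk log).getD "userId" "") []
      (· ++ [(PySem.Dict.mk log).getD "timestamp" ""]))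
    (PySem.Dict.empty : PySem.Dict String (List String))
  groups.items.map (fun p =>
    (p.1, ((PySem.List.min? p.2 (fun x => x)).getD "") ++ " - " ++
          ((PySem.List.max? p.2 (fun x => x)).getD "")))

-- ===== PRECONDITION & SPEC =====
-- Pre_ excludes logs missing a "userId" or "timestamp" key, on which Python A raises KeyError.
def Pre_get_user_time_ranges (logs : List (List (String × String))) : Prop :=
  (logs.all (fun log => (PySem.Dict.mk log).contains "userId" &&
                        (PySem.Dict.mk log).contains "timestamp")) = true
instance (logs : List (List (String × String))) : Decidable (Pre_get_user_time_ranges logs) := by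
  unfold Pre_get_user_time_ranges; infer_instance

def pvWitness_get_user_time_ranges : (List (List (String × String))) :=
  [[("userId", "u1"), ("timestamp", "09:00")],
   [("userId", "u1"), ("timestamp", "08:30")],
   [("userId", "u2"), ("timestamp", "10:00")]]

def Spec_get_user_time_ranges (logs : List (List (String × String))) (out : List (String × String)) : Prop := out = get_user_time_ranges_alt logs
instance (logs : List (List (String × String))) (out : List (String × String)) : Decidable (Spec_get_user_time_ranges logs out) := by unfold Spec_get_user_time_ranges; infer_instance

-- ===== CLAIM (what is proved, stated in full; the proofs are below) =====
def Claim_equal_get_user_time_ranges : Prop := ∀ (logs : List (List (String × String))), Dom_get_user_time_ranges logs → Pre_get_user_time_ranges logs → Spec_get_user_time_ranges logs (get_user_time_ranges logs)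

-- ===== LEMMAS AND PROOFS =====

-- the reduction B's second pass applies to a group
def pvRed (l : List String) : String × String :=
  ((PySem.List.min? l (fun x => x)).getD "", (PySem.List.max? l (fun x => x)).getD "")

lemma pvRed_singleton (ts : String) : pvRed [ts] = (ts, ts) := rfl

lemma pvRed_append (l : List String) (hl : l ≠ []) (ts : String) :
    pvRed (l ++ [ts]) = (min (pvRed l).1 ts, max (pvRed l).2 ts) := by
  obtain ⟨x, t, rfl⟩ := List.exists_cons_of_ne_nil hl
  simp [pvRed, PySem.List.min?_id_cons, PySem.List.max?_id_cons, List.foldl_append]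

-- loop invariant: A's dict is B's dict with every group reduced by pvRed, same key order
lemma pv_loop (logs : List (List (String × String)))
    (dA : PySem.Dict String (String × String)) (dB : PySem.Dict String (List String))
    (hit : dA.items = dB.items.map (fun p => (p.1, pvRed p.2)))
    (hne : ∀ p ∈ dB.items, p.2 ≠ [])
    (hnd : dB.keys.Nodup) :
    (logs.foldl (fun d log =>
      let uid := (PySem.Dict.mk log).getD "userId" ""
      let ts  := (PySem.Dict.mk log).getD "timestamp" ""
      if !(d.contains uid) then
        d.insert uid (ts, ts)
      else
        let cur := d.getD uid ("", "")
        d.insert uid (min cur.1 ts, max cur.2 ts)) dA).items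
    = ((logs.foldl (fun d log =>
        d.modify ((PySem.Dict.mk log).getD "userId" "") []
          (· ++ [(PySem.Dict.mk log).getD "timestamp" ""])) dB).items).map
        (fun p => (p.1, pvRed p.2)) := by
  induction logs generalizing dA dB with
  | nil => simpa using hit
  | cons log rest ih =>
    simp only [List.foldl_cons]
    set uid := (PySem.Dict.mk log).getD "userId" "" with huid
    set ts := (PySem.Dict.mk log).getD "timestamp" "" with hts
    have hkeys : dA.keys = dB.keys := by
      simp only [PySem.Dict.keys, hit, List.map_map]; rfl
    have hcont : dA.contains uid = dB.contains uid := by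
      by_cases h : uid ∈ dB.keys
      · rw [(PySem.Dict.contains_iff_mem_keys dA uid).2 (hkeys ▸ h),
            (PySem.Dict.contains_iff_mem_keys dB uid).2 h]
      · have : dA.contains uid = false := by
          by_contra hc
          exact h (hkeys ▸ ((PySem.Dict.contains_iff_mem_keys dA uid).1 (by simpa using hc)))
        rw [this]
        symm; by_contra hc
        exact h ((PySem.Dict.contains_iff_mem_keys dB uid).1 (by simpa using hc))
    have hmod : dB.modify uid [] (· ++ [ts]) = dB.insert uid (dB.getD uid [] ++ [ts]) := rfl
    by_cases hc : dB.contains uid = true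
    · -- existing key: both overwrite in place
      have hcA : dA.contains uid = true := by rw [hcont]; exact hc
      rw [hmod, hcA]
      simp only [Bool.not_true, Bool.false_eq_true, if_false]
      apply ih
      · rw [PySem.Dict.items_insert_of_contains _ _ hcA,
            PySem.Dict.items_insert_of_contains _ _ hc, hit,
            List.map_map, List.map_map]
        apply List.map_congr_left
        intro p hp
        by_cases hpk : p.1 == uid
        · have hp1 : p.1 = uid := by simpa using hpk
          have hmem : (uid, p.2) ∈ dB.items := by rw [← hp1]; exact hp
          have hget : dB.getD uid [] = p.2 :=
            PySem.Dict.getD_of_mem_items dB hmem hnd []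
          have hgetA : dA.getD uid ("", "") = pvRed p.2 := by
            have hmemA : (uid, pvRed p.2) ∈ dA.items := by
              rw [hit]
              exact List.mem_map.2 ⟨(uid, p.2), hmem, rfl⟩
            exact PySem.Dict.getD_of_mem_items dA hmemA (hkeys ▸ hnd) _
          simp only [Function.comp, hpk, hget, hgetA, if_pos]
          rw [pvRed_append p.2 (hne (uid, p.2) hmem) ts]
        · simp [Function.comp, hpk]
      · intro p hp
        rw [PySem.Dict.items_insert_of_contains _ _ hc] at hp
        obtain ⟨q, hq, rfl⟩ := List.mem_map.1 hp
        by_cases hqk : q.1 == uid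
        · simp only [hqk, if_pos]
          simp
        · simp only [hqk, if_neg, Bool.false_eq_true, not_false_iff]
          exact hne q hq
      · rw [PySem.Dict.keys_insert_of_contains _ _ hc]
        exact hnd
    · -- fresh key: both append
      have hcA : dA.contains uid = false := by
        rw [hcont]; simpa using hc
      have hc' : dB.contains uid = false := by simpa using hc
      rw [hmod, hcA]
      simp only [Bool.not_false, if_pos]
      apply ih
      · rw [PySem.Dict.items_insert_of_not_contains _ _ hcA,
            PySem.Dict.items_insert_of_not_contains _ _ hc', hit,
            PySem.Dict.getD_of_not_contains dB [] hc']
        simp [pvRed_singleton]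
      · intro p hp
        rw [PySem.Dict.items_insert_of_not_contains _ _ hc',
            PySem.Dict.getD_of_not_contains dB [] hc'] at hp
        rcases List.mem_append.1 hp with h | h
        · exact hne p h
        · simp at h; subst h; simp
      · rw [PySem.Dict.keys_insert_of_not_contains _ _ hc']
        exact List.Nodup.append hnd (List.nodup_singleton uid)
          (by
            intro a ha hb
            simp at hb; subst hb
            exact absurd ((PySem.Dict.contains_iff_mem_keys dB uid).2 ha) (by simp [hc']))

-- ===== VERDICT (by name: the statement is the Claim_ definition above) =====
theorem get_user_time_ranges_spec : Claim_equal_get_user_time_ranges := by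
  intro logs _ _
  show get_user_time_ranges logs = get_user_time_ranges_alt logs
  simp only [get_user_time_ranges, get_user_time_ranges_alt]
  rw [pv_loop logs PySem.Dict.empty PySem.Dict.empty rfl (by intro p hp; simp [PySem.Dict.empty] at hp) (by simp [PySem.Dict.keys_empty])]
  rw [List.map_map]
  apply List.map_congr_left
  intro p _
  rfl
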